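-- pv_equiv track=rewrite | github.com/openculinary/hashedixsearch | hashedixsearch/_internal.py | _candidate_matches
-- ===== SOURCE A (Python) =====
-- from string import punctuation
--
-- def _is_separator(token):
--     if token is None:
--         return False
--     if token.isspace():
--         return True
--     if token.strip(punctuation) == str():
--         return True
--     return False
--
-- def _candidate_matches(ngram, terms):
--
--     # Never consider an ngram that begins with a separator as a match
--     if _is_separator(ngram[0]):
--         return
--
--     # Open an iterator over the ngram terms
--     ngram_tokens = iter(ngram)
--
--     # Open an iterator over each candidate term's tokens
--     candidates = {
--         term: iter(term_tokens)
--         for term, term_tokens in terms.items()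
--     }
--
--     # Step through the input ngram
--     while ngram_token := next(ngram_tokens, None):
--
--         # Skip past separator tokens
--         while _is_separator(ngram_token):
--             ngram_token = next(ngram_tokens, None)
--         if not ngram_token:
--             break
--
--         # Narrow the list of candidates to those that continue to match
--         candidates = {
--             term: term_tokens
--             for term, term_tokens in candidates.items()
--             if next(term_tokens, None) == ngram_token
--         }
--
--     # Return the candidate terms along with copies of their token lists
--     return {
--         term: list(term_tokens)
--         for term, term_tokens in terms.items()
--         if term in candidates
--     }
-- ===== SOURCE B (Python) =====
-- from string import punctuation
--
--
-- def _is_separator(token):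
--     if token is None:
--         return False
--     if token.isspace():
--         return True
--     if token.strip(punctuation) == str():
--         return True
--     return False
--
--
-- def _prefix_match(match_tokens, term_tokens):
--     it = iter(term_tokens)
--     return all(next(it, None) == m for m in match_tokens)
--
--
-- def _candidate_matches(ngram, terms):
--
--     # Never consider an ngram that begins with a separator as a match
--     if _is_separator(ngram[0]):
--         return
--
--     # Extract the ngram's match tokens once (skip separators, stop on falsy)
--     match_tokens = []
--     ngram_tokens = iter(ngram)
--     while ngram_token := next(ngram_tokens, None):
--         while _is_separator(ngram_token):
--             ngram_token = next(ngram_tokens, None)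
--         if not ngram_token:
--             break
--         match_tokens.append(ngram_token)
--
--     # Keep exactly the terms whose token stream starts with those match tokens
--     return {
--         term: list(term_tokens)
--         for term, term_tokens in terms.items()
--         if _prefix_match(match_tokens, term_tokens)
--     }
-- ===== Notes on version B (the rewrite author's own statement) =====
-- stated objective: simpler
-- what changed: A narrows a dict of per-term token iterators in lockstep while it walks the ngram; B extracts the ngram's match tokens once and then keeps each term by a single independent prefix check, dropping the repeated dict rebuilds.
import Mathlib
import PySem

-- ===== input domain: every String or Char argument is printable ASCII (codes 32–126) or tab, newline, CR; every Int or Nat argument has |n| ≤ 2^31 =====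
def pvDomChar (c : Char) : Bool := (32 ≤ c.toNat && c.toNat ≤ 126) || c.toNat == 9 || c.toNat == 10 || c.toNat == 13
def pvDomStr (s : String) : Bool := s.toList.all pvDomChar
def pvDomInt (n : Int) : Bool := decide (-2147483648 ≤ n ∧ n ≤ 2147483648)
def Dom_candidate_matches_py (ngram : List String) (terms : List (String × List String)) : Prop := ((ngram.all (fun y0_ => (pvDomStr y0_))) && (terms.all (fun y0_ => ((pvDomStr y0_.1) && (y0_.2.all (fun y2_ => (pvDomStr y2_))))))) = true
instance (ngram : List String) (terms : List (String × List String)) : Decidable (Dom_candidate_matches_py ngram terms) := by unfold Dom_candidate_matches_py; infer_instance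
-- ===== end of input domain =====

-- B replaces A's lockstep dict-narrowing with a one-time extraction of the ngram's
-- match tokens followed by a single prefix-check pass over the terms (simpler decomposition).

-- ===== PORT A =====

-- string.punctuation
def pvPunct : String := "!\"#$%&'()*+,-./:;<=>?@[\\]^_`{|}~"

-- _is_separator on an actual string token (the None case is handled structurally
-- by the Option-shaped loops below: _is_separator(None) is False in Python)
def isSepStr (t : String) : Bool :=
  PySem.Str.strIsspace t || (PySem.Str.stripChars t pvPunct == "")

-- the inner "while _is_separator(ngram_token): ngram_token = next(ngram_tokens, None)"
-- loop, shared verbatim by both Pythons: returns the first non-separator token (or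
-- none when the iterator is exhausted) together with the rest of the iterator
def skipSep (t : String) (rest : List String) : Option String × List String :=
  if isSepStr t then
    match rest with
    | [] => (none, [])
    | u :: rest' => skipSep u rest'
  else (some t, rest)

theorem skipSep_snd_length_le (t : String) (rest : List String) :
    (skipSep t rest).2.length ≤ rest.length := by
  induction rest generalizing t with
  | nil => unfold skipSep; split <;> simp
  | cons u rest' ih =>
    unfold skipSep
    split
    · exact le_trans (ih u) (by simp)
    · simp

-- A's outer "while ngram_token := next(ngram_tokens, None)" loop, threading the
-- candidates dict (term ↦ remaining token iterator) and narrowing it at each step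
def loopA (rest : List String) (cands : List (String × List String)) :
    List (String × List String) :=
  match rest with
  | [] => cands                    -- next() returned None: walrus condition falsy
  | t :: r =>
    if t = "" then cands           -- walrus condition falsy on the empty string
    else
      match (skipSep t r).1 with
      | none => cands              -- "if not ngram_token: break"
      | some tok =>
        loopA (skipSep t r).2 (cands.filterMap (fun p =>
          match p.2 with
          | [] => none                                        -- next(term_tokens, None) is None ≠ tok
          | x :: xs => if x == tok then some (p.1, xs) else none))
termination_by rest.length
decreasing_by
  simpa using Nat.lt_succ_of_le (skipSep_snd_length_le t r)

def candidate_matches_py (ngram : List String) (terms : List (String × List String)) :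
    Option (List (String × List String)) :=
  match ngram with
  | [] => none                     -- ngram[0] raises IndexError: excluded by Pre_
  | h :: r =>
    if isSepStr h then none        -- "return" (None)
    else
      let cands := loopA (h :: r) terms
      some (terms.filter (fun p => cands.any (fun c => c.1 == p.1)))

-- ===== PORT B =====

-- B's extraction loop: collect the match tokens once (same while-loop shape)
def extractB (rest : List String) : List String :=
  match rest with
  | [] => []
  | t :: r =>
    if t = "" then []
    else
      match (skipSep t r).1 with
      | none => []
      | some tok => tok :: extractB (skipSep t r).2
termination_by rest.length
decreasing_by
  simpa using Nat.lt_succ_of_le (skipSep_snd_length_le t r)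

-- _prefix_match: all(next(it, None) == m for m in match_tokens)
def prefixMatchB : List String → List String → Bool
  | [], _ => true
  | _ :: _, [] => false            -- next gave None, m is a non-empty string
  | m :: ms, x :: xs => x == m && prefixMatchB ms xs

def candidate_matches_py_alt (ngram : List String) (terms : List (String × List String)) :
    Option (List (String × List String)) :=
  match ngram with
  | [] => none                     -- ngram[0] raises IndexError: excluded by Pre_
  | h :: r =>
    if isSepStr h then none
    else
      let M := extractB (h :: r)
      some (terms.filter (fun p => prefixMatchB M p.2))

-- ===== PRECONDITION & SPEC =====
-- Pre_ excludes the empty ngram, on which A raises IndexError, and association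
-- lists with duplicate keys, which cannot arise from a Python dict argument.
def Pre_candidate_matches_py (ngram : List String) (terms : List (String × List String)) : Prop :=
  ngram ≠ [] ∧ (terms.map Prod.fst).Nodup
instance (ngram : List String) (terms : List (String × List String)) : Decidable (Pre_candidate_matches_py ngram terms) := by unfold Pre_candidate_matches_py; infer_instance

def pvWitness_candidate_matches_py : List String × (List (String × List String)) :=
  (["a", " ", "b"], [("t1", ["a", "b"]), ("t2", ["a"]), ("t3", ["b"])])

def Spec_candidate_matches_py (ngram : List String) (terms : List (String × List String)) (out : Option (List (String × List String))) : Prop := out = candidate_matches_py_alt ngram terms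
instance (ngram : List String) (terms : List (String × List String)) (out : Option (List (String × List String))) : Decidable (Spec_candidate_matches_py ngram terms out) := by unfold Spec_candidate_matches_py; infer_instance

-- ===== CLAIM (what is proved, stated in full; the proofs are below) =====
def Claim_equal_candidate_matches_py : Prop := ∀ (ngram : List String) (terms : List (String × List String)), Dom_candidate_matches_py ngram terms → Pre_candidate_matches_py ngram terms → Spec_candidate_matches_py ngram terms (candidate_matches_py ngram terms)

-- ===== LEMMAS AND PROOFS =====

-- advancing one candidate's iterator through a whole list of match tokens
def adv : List String → List String → Option (List String)
  | [], tt => some tt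
  | _ :: _, [] => none
  | m :: ms, x :: xs => if x == m then adv ms xs else none

theorem loopA_eq_adv_aux (n : Nat) : ∀ (rest : List String), rest.length ≤ n →
    ∀ (cands : List (String × List String)),
    loopA rest cands =
      cands.filterMap (fun p => (adv (extractB rest) p.2).map (fun s => (p.1, s))) := by
  induction n with
  | zero =>
    intro rest hlen cands
    have : rest = [] := List.eq_nil_of_length_eq_zero (Nat.le_zero.mp hlen)
    subst this
    simp [loopA, extractB, adv]
  | succ n ih =>
    intro rest hlen cands
    cases rest with
    | nil => simp [loopA, extractB, adv]
    | cons t r =>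
      rw [loopA, extractB]
      by_cases ht : t = ""
      · simp [ht, adv]
      · simp only [ht, if_false]
        rcases hss : skipSep t r with ⟨o, r'⟩
        cases o with
        | none => simp [adv]
        | some tok =>
          simp only [hss]
          have hr' : r'.length ≤ n := by
            have := skipSep_snd_length_le t r
            rw [hss] at this
            simp at this hlen
            omega
          rw [ih r' hr']
          rw [List.filterMap_filterMap]
          apply List.filterMap_congr
          intro p _
          cases p with
          | mk term tt =>
            cases tt with
            | nil => simp [adv]
            | cons x xs =>
              simp only [adv]
              by_cases hx : x == tok
              · simp [hx]
              · simp [hx]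

theorem loopA_eq_adv (rest : List String) (cands : List (String × List String)) :
    loopA rest cands =
      cands.filterMap (fun p => (adv (extractB rest) p.2).map (fun s => (p.1, s))) :=
  loopA_eq_adv_aux rest.length rest le_rfl cands

theorem prefixMatchB_eq_isSome (M tt : List String) :
    prefixMatchB M tt = (adv M tt).isSome := by
  induction M generalizing tt with
  | nil => simp [prefixMatchB, adv]
  | cons m ms ih =>
    cases tt with
    | nil => simp [prefixMatchB, adv]
    | cons x xs =>
      simp only [prefixMatchB, adv]
      split_ifs with h <;> simp [h, ih]

theorem eq_of_mem_of_nodup_keys {α β : Type} {ts : List (α × β)}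
    (hnd : (ts.map Prod.fst).Nodup) {p q : α × β}
    (hp : p ∈ ts) (hq : q ∈ ts) (hk : p.1 = q.1) : p = q := by
  induction ts with
  | nil => simp at hp
  | cons a ts ih =>
    simp only [List.map_cons, List.nodup_cons] at hnd
    rcases List.mem_cons.mp hp with rfl | hp' <;>
      rcases List.mem_cons.mp hq with rfl | hq'
    · rfl
    · exact absurd (hk ▸ List.mem_map_of_mem hq') hnd.1
    · exact absurd (hk ▸ List.mem_map_of_mem hp') hnd.1
    · exact ih hnd.2 hp' hq'

-- ===== VERDICT (by name: the statement is the Claim_ definition above) =====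
theorem candidate_matches_py_spec : Claim_equal_candidate_matches_py := by
  intro ngram terms _ hpre
  unfold Spec_candidate_matches_py candidate_matches_py candidate_matches_py_alt
  cases ngram with
  | nil => exact absurd rfl hpre.1
  | cons h r =>
    by_cases hsep : isSepStr h
    · simp [hsep]
    · simp only [hsep, Bool.false_eq_true, if_false, Option.some.injEq]
      apply List.filter_congr
      intro p hp
      rw [loopA_eq_adv, prefixMatchB_eq_isSome]
      cases hadv : adv (extractB (h :: r)) p.2 with
      | some s =>
        simp only [Option.isSome_some]
        rw [List.any_eq_true]
        exact ⟨(p.1, s), List.mem_filterMap.mpr ⟨p, hp, by rw [hadv]; rfl⟩, by simp⟩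
      | none =>
        simp only [Option.isSome_none]
        rw [List.any_eq_false]
        rintro c hc
        rcases List.mem_filterMap.mp hc with ⟨q, hq, hfq⟩
        cases hadvq : adv (extractB (h :: r)) q.2 with
        | none => rw [hadvq] at hfq; simp at hfq
        | some sq =>
          rw [hadvq] at hfq
          simp only [Option.map_some, Option.some.injEq] at hfq
          subst hfq
          simp only [beq_iff_eq]
          intro hkey
          have : q = p := eq_of_mem_of_nodup_keys hpre.2 hq hp hkey
          subst this
          rw [hadv] at hadvq
          simp at hadvq
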